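-- pv_equiv track=rewrite | github.com/Samet-Hodaman/Advent-of-Code-2023- | Advent of Code/Day12- Hot Springs/day12.py | increase_string
-- ===== SOURCE A (Python) =====
-- def increase_string(old_spring : str, indexes : list) -> str:
--     spring = old_spring
--     indexes_of_hash = []
--     for i in indexes:
--         if (spring[i] == "."):
--             spring = spring[:i] + "#" + spring[i+1:]
--             break
--         else:
--             indexes_of_hash.append(i)
--     for i in indexes_of_hash:
--         spring = spring[:i] + "." + spring[i+1:]
--     return spring
-- ===== SOURCE B (Python) =====
-- def increase_string(old_spring : str, indexes : list) -> str:
--     n = len(old_spring)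
--     k = next((j for j, i in enumerate(indexes) if old_spring[i] == "."), len(indexes))
--     norm = lambda i: i + n if i < 0 else i
--     flip = norm(indexes[k]) if k < len(indexes) else None
--     reset = {norm(i) for i in indexes[:k]}
--     return "".join("#" if p == flip else "." if p in reset else ch
--                    for p, ch in enumerate(old_spring))
-- ===== Notes on version B (the rewrite author's own statement) =====
-- stated objective: alternative
-- what changed: Instead of A's index-driven mutation (collect scanned indexes, break on '.', then a second reset pass of slice splices), B first locates the position k of the first index whose character is '.', normalizes the scanned indexes into a set of absolute positions, and rebuilds the string in one comprehension over the string's positions ('#' at the flip position, '.' at reset positions, old char elsewhere).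
-- intended difference: When -1 occurs in indexes before any index holding '.', A's slicing spring[:i]+c+spring[i+1:] with i=-1 duplicates the whole string (e.g. A('#',[-1]) = '.#'), while B replaces the last character as intended (B('#',[-1]) = '.'). — e.g. on increase_string("#", [-1]): A returns ".#", B returns "."
import Mathlib
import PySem

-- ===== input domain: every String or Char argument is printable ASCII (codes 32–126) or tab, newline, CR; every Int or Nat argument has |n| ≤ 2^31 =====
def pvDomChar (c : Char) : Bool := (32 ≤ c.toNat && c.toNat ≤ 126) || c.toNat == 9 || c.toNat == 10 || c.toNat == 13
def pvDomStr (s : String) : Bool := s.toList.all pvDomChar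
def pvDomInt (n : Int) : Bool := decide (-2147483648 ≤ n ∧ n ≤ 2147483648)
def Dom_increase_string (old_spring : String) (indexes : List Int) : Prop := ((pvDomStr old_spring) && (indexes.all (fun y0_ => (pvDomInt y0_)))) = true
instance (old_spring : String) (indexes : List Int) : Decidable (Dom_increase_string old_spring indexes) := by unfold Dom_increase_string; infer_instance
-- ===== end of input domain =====

-- B replaces A's index-driven mutation (collect indexes, break on '.', then a second
-- reset pass of slice splices) with: find the position of the first '.' index, build a
-- set of normalized reset positions, and rebuild the string in one pass over its
-- positions (objective: alternative); on indexes containing -1 before the first '.',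
-- A's slice splice is wrong (duplicates the string) and B returns the intended value (see D_).

-- ===== PORT A =====
-- spring[:i] + c + spring[i+1:]  (A's slice-splice, on the code-point list)
def pvSpliceA (s : List Char) (i : Int) (c : Char) : List Char :=
  PySem.List.slice s none (some i) ++ [c] ++ PySem.List.slice s (some (i + 1)) none

-- A's first loop: scan `indexes`, append to indexes_of_hash, break on '.' (splice '#').
-- (spring is only reassigned at the break, so the scanned string stays `spring`.)
def pvLoopA (spring : List Char) (hashes : List Int) : List Int → List Char × List Int
  | [] => (spring, hashes)
  | i :: rest =>
    if PySem.List.pyGet? spring i = some '.' then (pvSpliceA spring i '#', hashes)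
    else pvLoopA spring (hashes ++ [i]) rest

def increase_string (old_spring : String) (indexes : List Int) : String :=
  let p := pvLoopA old_spring.toList [] indexes
  String.ofList (p.2.foldl (fun s i => pvSpliceA s i '.') p.1)

-- ===== PORT B =====
-- k = next((j for j, i in enumerate(indexes) if old_spring[i] == "."), len(indexes))
def pvFindDot (old : List Char) : List Int → Nat
  | [] => 0
  | i :: rs => if PySem.List.pyGet? old i = some '.' then 0 else pvFindDot old rs + 1

-- norm = lambda i: i + n if i < 0 else i
def pvNorm (n : Nat) (i : Int) : Int := if i < 0 then i + n else i

def increase_string_alt (old_spring : String) (indexes : List Int) : String :=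
  let old := old_spring.toList
  let n := old.length
  let k := pvFindDot old indexes
  -- flip = norm(indexes[k]) if k < len(indexes) else None
  let flip : Option Int :=
    if k < indexes.length then some (pvNorm n (indexes.getD k 0)) else none
  -- reset = {norm(i) for i in indexes[:k]}
  let reset : PySem.Set Int := PySem.Set.ofList ((indexes.take k).map (pvNorm n))
  -- "".join("#" if p == flip else "." if p in reset else ch for p, ch in enumerate(old_spring))
  String.ofList ((PySem.List.enumerate old).map (fun pc =>
    if some pc.1 = flip then '#'
    else if PySem.Set.contains reset pc.1 then '.' else pc.2))

-- ===== PRECONDITION & SPEC =====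
-- Pre_ excludes exactly the inputs where the Python A raises IndexError: some index that the
-- loop actually examines (i.e. before the first index holding '.') is out of range.
def Pre_increase_string (old_spring : String) (indexes : List Int) : Prop :=
  ∀ k, k < indexes.length →
    (∀ j, j < k → PySem.Str.pyGet? old_spring (indexes.getD j 0) ≠ some '.') →
    PySem.Raise.InRange old_spring.toList.length (indexes.getD k 0)
instance (old_spring : String) (indexes : List Int) : Decidable (Pre_increase_string old_spring indexes) := by
  unfold Pre_increase_string; infer_instance

def pvWitness_increase_string : String × List Int := ("#.", [0, 1])

-- On inputs whose index list contains -1 before any index holding '.', A returns a string with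
-- the whole old string spliced in (spring[:i]+c+spring[i+1:] is wrong for i = -1, e.g.
-- A("#",[-1]) = ".#"), while B replaces the last character as intended (B("#",[-1]) = ".").
def D_increase_string (old_spring : String) (indexes : List Int) : Prop :=
  ∃ k, k < indexes.length ∧ indexes.getD k 0 = -1 ∧
    ∀ j, j < k → PySem.Str.pyGet? old_spring (indexes.getD j 0) ≠ some '.'
instance (old_spring : String) (indexes : List Int) : Decidable (D_increase_string old_spring indexes) := by
  unfold D_increase_string; infer_instance

def Spec_increase_string (old_spring : String) (indexes : List Int) (out : String) : Prop :=
  ¬ D_increase_string old_spring indexes → out = increase_string_alt old_spring indexes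
instance (old_spring : String) (indexes : List Int) (out : String) : Decidable (Spec_increase_string old_spring indexes out) := by
  unfold Spec_increase_string; infer_instance

def pvDiffWitness_increase_string : String × List Int := ("#", [-1])
def pvDiffWitnessOut_increase_string : String × String := (".#", ".")

-- ===== CLAIM (what is proved, stated in full; the proofs are below) =====
def Claim_unchanged_increase_string : Prop := ∀ (old_spring : String) (indexes : List Int), Dom_increase_string old_spring indexes → Pre_increase_string old_spring indexes → Spec_increase_string old_spring indexes (increase_string old_spring indexes)
def Claim_changed_increase_string : Prop := Dom_increase_string (pvDiffWitness_increase_string.1) (pvDiffWitness_increase_string.2) ∧ Pre_increase_string (pvDiffWitness_increase_string.1) (pvDiffWitness_increase_string.2) ∧ D_increase_string (pvDiffWitness_increase_string.1) (pvDiffWitness_increase_string.2) ∧ increase_string (pvDiffWitness_increase_string.1) (pvDiffWitness_increase_string.2) = pvDiffWitnessOut_increase_string.1 ∧ increase_string_alt (pvDiffWitness_increase_string.1) (pvDiffWitness_increase_string.2) = pvDiffWitnessOut_increase_string.2 ∧ pvDiffWitnessOut_increase_string.1 ≠ pvDiffWitnessOut_increase_string.2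

def Claim_exact_increase_string : Prop := ∀ (old_spring : String) (indexes : List Int), Dom_increase_string old_spring indexes → Pre_increase_string old_spring indexes → D_increase_string old_spring indexes → increase_string old_spring indexes ≠ increase_string_alt old_spring indexes

-- ===== LEMMAS AND PROOFS =====

-- the Nat position Python's index i denotes in a list of length n
def pvIdx (n : Nat) (i : Int) : Nat := if 0 ≤ i then i.toNat else n - (-i).toNat

theorem pvGet_eq (l : List Char) (i : Int) (h1 : -(l.length : Int) ≤ i) (h2 : i < l.length) :
    PySem.List.pyGet? l i = some (l.getD (pvIdx l.length i) 'x') := by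
  by_cases h : 0 ≤ i
  · have hlt : i.toNat < l.length := by omega
    simp [PySem.List.pyGet?, PySem.List.pyIdx?, pvIdx, h, h2,
      List.getD_eq_getElem?_getD]
  · have hlt : l.length - (-i).toNat < l.length := by omega
    simp [PySem.List.pyGet?, PySem.List.pyIdx?, pvIdx, h, h1,
      List.getD_eq_getElem?_getD, List.getElem?_eq_getElem hlt]

theorem pvSetD_eq (s : List Char) (i : Int) (c : Char)
    (h1 : -(s.length : Int) ≤ i) (h2 : i < s.length) :
    PySem.List.pySetD s i c = s.set (pvIdx s.length i) c := by
  by_cases h : 0 ≤ i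
  · simp [PySem.List.pySetD, PySem.List.pySet?, PySem.List.pyIdx?, pvIdx, h, h2]
  · simp [PySem.List.pySetD, PySem.List.pySet?, PySem.List.pyIdx?, pvIdx, h, h1]

theorem pvSplice_eq_set (s : List Char) (i : Int) (c : Char)
    (h1 : -(s.length : Int) ≤ i) (h2 : i < s.length) (hne : i ≠ -1) :
    pvSpliceA s i c = s.set (pvIdx s.length i) c := by
  unfold pvSpliceA
  by_cases h : 0 ≤ i
  · rw [PySem.List.slice_to s h, PySem.List.slice_from s (by omega : (0:Int) ≤ i + 1),
      List.set_eq_take_append_cons_drop]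
    have : (i + 1).toNat = i.toNat + 1 := by omega
    simp [pvIdx, h, this, List.append_assoc]
    intro hge; omega
  · have hk : ∃ k : Nat, i = -(k : Int) ∧ 2 ≤ k ∧ k ≤ s.length := by
      refine ⟨(-i).toNat, by omega, by omega, by omega⟩
    obtain ⟨k, rfl, hk2, hk3⟩ := hk
    have h1' : -(k : Int) + 1 = -((k - 1 : Nat) : Int) := by omega
    rw [PySem.List.slice_to_neg_natCast s k (by omega), h1',
      PySem.List.slice_from_neg_natCast s (k - 1) (by omega),
      List.set_eq_take_append_cons_drop]
    have hp : pvIdx s.length (-(k : Int)) = s.length - k := by simp [pvIdx]; omega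
    have : s.length - (k - 1) = (s.length - k) + 1 := by omega
    rw [hp, this]
    simp [List.append_assoc]
    intro hge; omega

theorem pvFoldSet_length (n : Nat) (hs : List Int) (s : List Char) :
    (hs.foldl (fun t j => t.set (pvIdx n j) '.') s).length = s.length := by
  induction hs generalizing s with
  | nil => rfl
  | cons j rest ih => simp [List.foldl_cons, ih, List.length_set]

theorem pvFoldSet_comm (n : Nat) (hs : List Int) (s : List Char) (p : Nat) (c : Char)
    (h : ∀ j ∈ hs, pvIdx n j ≠ p) :
    hs.foldl (fun t j => t.set (pvIdx n j) '.') (s.set p c)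
      = (hs.foldl (fun t j => t.set (pvIdx n j) '.') s).set p c := by
  induction hs generalizing s with
  | nil => rfl
  | cons j rest ih =>
    simp only [List.foldl_cons]
    rw [List.set_comm c '.' (Ne.symm (h j (by simp)))]
    exact ih _ (fun q hq => h q (by simp [hq]))

-- an index is good when it is in range and not -1 (the splice then IS a set)
def pvGood (l : List Char) (i : Int) : Prop :=
  -(l.length : Int) ≤ i ∧ i < l.length ∧ i ≠ -1

-- every index the first loop examines (up to and including the break) is good
def pvGoodPrefix (l : List Char) : List Int → Prop
  | [] => True
  | i :: rs => pvGood l i ∧ (PySem.List.pyGet? l i = some '.' ∨ pvGoodPrefix l rs)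

theorem pvResetF_eq (l : List Char) (hs : List Int) (s : List Char) (hlen : s.length = l.length)
    (hgood : ∀ j ∈ hs, pvGood l j) :
    hs.foldl (fun t j => pvSpliceA t j '.') s
      = hs.foldl (fun t j => t.set (pvIdx l.length j) '.') s := by
  induction hs generalizing s with
  | nil => rfl
  | cons j rest ih =>
    obtain ⟨hj1, hj2, hj3⟩ := hgood j (by simp)
    simp only [List.foldl_cons]
    rw [pvSplice_eq_set s j '.' (by omega) (by omega) hj3]
    have : pvIdx s.length j = pvIdx l.length j := by rw [hlen]
    rw [this]
    exact ih _ (by simp [List.length_set, hlen]) (fun q hq => hgood q (by simp [hq]))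

-- proof-side intermediate form of the computation: one pass that resets visited
-- positions and stops at the first '.' (A is reduced TO it, B is reduced FROM it)
def pvLoopB (old : List Char) : List Char → List Int → List Char
  | chars, [] => chars
  | chars, i :: rest =>
    if PySem.List.pyGet? old i = some '.' then PySem.List.pySetD chars i '#'
    else pvLoopB old (PySem.List.pySetD chars i '.') rest

theorem pvCore (l : List Char) (rest : List Int) (hs : List Int)
    (hhs : ∀ j ∈ hs, pvGood l j ∧ PySem.List.pyGet? l j ≠ some '.')
    (hr : pvGoodPrefix l rest) :
    (pvLoopA l hs rest).2.foldl (fun s i => pvSpliceA s i '.') (pvLoopA l hs rest).1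
      = pvLoopB l (hs.foldl (fun t j => t.set (pvIdx l.length j) '.') l) rest := by
  induction rest generalizing hs with
  | nil =>
    simp only [pvLoopA, pvLoopB]
    exact pvResetF_eq l hs l rfl (fun j hj => (hhs j hj).1)
  | cons i rs ih =>
    obtain ⟨⟨hg1, hg2, hg3⟩, hdis⟩ := hr
    by_cases h : PySem.List.pyGet? l i = some '.'
    · simp only [pvLoopA, pvLoopB, h, if_pos]
      have hfl : (hs.foldl (fun t j => t.set (pvIdx l.length j) '.') l).length = l.length :=
        pvFoldSet_length l.length hs l
      rw [pvSplice_eq_set l i '#' hg1 hg2 hg3,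
        pvResetF_eq l hs (l.set (pvIdx l.length i) '#')
          (by simp [List.length_set]) (fun j hj => (hhs j hj).1),
        pvFoldSet_comm l.length hs l (pvIdx l.length i) '#'
          (fun j hj => by
            obtain ⟨⟨hj1, hj2, _⟩, hj4⟩ := hhs j hj
            intro heq
            rw [pvGet_eq l j hj1 hj2, heq, ← pvGet_eq l i hg1 hg2] at hj4
            exact hj4 h),
        pvSetD_eq _ i '#' (by omega) (by omega)]
      rw [hfl]
    · simp only [pvLoopA, pvLoopB, h, if_false]
      have hrs : pvGoodPrefix l rs := by
        rcases hdis with hdot | hok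
        · exact absurd hdot h
        · exact hok
      have hfl : (hs.foldl (fun t j => t.set (pvIdx l.length j) '.') l).length = l.length :=
        pvFoldSet_length l.length hs l
      rw [ih (hs ++ [i]) (by
        intro j hj
        rcases List.mem_append.mp hj with hj | hj
        · exact hhs j hj
        · simp at hj; subst hj; exact ⟨⟨hg1, hg2, hg3⟩, h⟩) hrs]
      rw [List.foldl_append, pvSetD_eq _ i '.' (by omega) (by omega), hfl]
      simp

-- ----- reducing B's find/set/rebuild to the intermediate one-pass form -----

-- for an in-range index, B's normalization names the same Nat position as pvIdx
theorem pvNorm_eq (n : Nat) (i : Int) (h1 : -(n : Int) ≤ i) (_h2 : i < n) :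
    pvNorm n i = ((pvIdx n i : Nat) : Int) := by
  unfold pvNorm pvIdx
  split_ifs <;> omega

-- the rebuild with flip = some q and no resets is List.set
theorem pvMapSet (chars : List Char) (q : Nat) (c : Char) (_hq : q < chars.length) :
    (PySem.List.enumerate chars).map (fun pc =>
        if pc.1 = (q : Int) then c else pc.2) = chars.set q c := by
  apply List.ext_getElem
  · simp [PySem.List.length_enumerate]
  · intro p hp hp'
    have hpl : p < chars.length := by
      simpa [PySem.List.length_enumerate] using hp
    simp only [List.getElem_map, PySem.List.getElem_enumerate, List.getElem_set, zero_add,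
      Nat.cast_inj]
    by_cases h : p = q
    · simp [h]
    · simp [h, Ne.symm h]

-- pushing one reset position out of the membership list and into the char buffer
theorem pvMapShift (chars : List Char) (q : Nat) (_hq : q < chars.length)
    (fl : Option Int) (rs : List Int) :
    (PySem.List.enumerate (chars.set q '.')).map (fun pc =>
        if some pc.1 = fl then '#' else if pc.1 ∈ rs then '.' else pc.2)
      = (PySem.List.enumerate chars).map (fun pc =>
        if some pc.1 = fl then '#' else if pc.1 ∈ ((q : Int) :: rs) then '.' else pc.2) := by
  apply List.ext_getElem
  · simp [PySem.List.length_enumerate]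
  · intro p hp hp'
    have hpl : p < chars.length := by
      simpa [PySem.List.length_enumerate] using hp
    simp only [List.getElem_map, PySem.List.getElem_enumerate, List.getElem_set, zero_add,
      List.mem_cons, Nat.cast_inj]
    by_cases hfl : some ((p : Nat) : Int) = fl
    · simp [hfl]
    · simp only [hfl, if_false]
      by_cases hpq : p = q
      · simp [hpq]
      · simp [hpq, Ne.symm hpq]

-- B's find/flip/reset rebuild equals the one-pass form on every good prefix
theorem pvAltCore (l : List Char) (idx : List Int) (chars : List Char)
    (hlen : chars.length = l.length) (hg : pvGoodPrefix l idx) :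
    (PySem.List.enumerate chars).map (fun pc =>
        if some pc.1 = (if pvFindDot l idx < idx.length then
              some (pvNorm l.length (idx.getD (pvFindDot l idx) 0)) else none) then '#'
        else if pc.1 ∈ (idx.take (pvFindDot l idx)).map (pvNorm l.length) then '.' else pc.2)
      = pvLoopB l chars idx := by
  induction idx generalizing chars with
  | nil =>
    simp only [pvFindDot, pvLoopB, List.take_nil, List.map_nil, List.not_mem_nil, if_false]
    simp
  | cons i rs ih =>
    obtain ⟨⟨hg1, hg2, hg3⟩, hdis⟩ := hg
    by_cases h : PySem.List.pyGet? l i = some '.'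
    · simp only [pvFindDot, pvLoopB, h, if_pos]
      have hlt : (0 : Nat) < (i :: rs).length := by simp
      simp only [hlt, if_pos, List.take_zero, List.map_nil, List.not_mem_nil, if_false,
        List.getD_cons_zero]
      rw [pvNorm_eq l.length i hg1 hg2, pvSetD_eq chars i '#' (by omega) (by omega)]
      have : pvIdx chars.length i = pvIdx l.length i := by rw [hlen]
      rw [this]
      have hq : pvIdx l.length i < chars.length := by
        unfold pvIdx; split_ifs <;> omega
      rw [← pvMapSet chars (pvIdx l.length i) '#' hq]
      apply List.map_congr_left
      intro pc _
      simp
    · have hrs : pvGoodPrefix l rs := by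
        rcases hdis with hdot | hok
        · exact absurd hdot h
        · exact hok
      simp only [pvFindDot, pvLoopB, h, if_false]
      rw [← ih (PySem.List.pySetD chars i '.')
        (by rw [PySem.List.length_pySetD, hlen]) hrs]
      rw [pvSetD_eq chars i '.' (by omega) (by omega)]
      have hcl : pvIdx chars.length i = pvIdx l.length i := by rw [hlen]
      have hq : pvIdx l.length i < chars.length := by
        unfold pvIdx; split_ifs <;> omega
      rw [hcl, pvMapShift chars (pvIdx l.length i) hq]
      apply List.map_congr_left
      intro pc _
      have hsucc : pvFindDot l rs + 1 < rs.length + 1 ↔ pvFindDot l rs < rs.length := by omega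
      simp only [List.length_cons, hsucc, List.getD_cons_succ, List.take_succ_cons,
        List.map_cons, List.mem_cons]
      rw [pvNorm_eq l.length i hg1 hg2]

theorem pvBridge (l : List Char) (idx : List Int)
    (hpre : ∀ k, k < idx.length →
      (∀ j, j < k → PySem.List.pyGet? l (idx.getD j 0) ≠ some '.') →
      PySem.Raise.InRange l.length (idx.getD k 0))
    (hnd : ∀ k, k < idx.length → idx.getD k 0 = -1 →
      ∃ j, j < k ∧ PySem.List.pyGet? l (idx.getD j 0) = some '.') :
    pvGoodPrefix l idx := by
  induction idx with
  | nil => trivial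
  | cons i rs ih =>
    have hin : PySem.Raise.InRange l.length i := by
      have := hpre 0 (by simp) (by omega)
      simpa using this
    obtain ⟨hin1, hin2⟩ := hin
    have hne : i ≠ -1 := by
      intro heq
      obtain ⟨j, hj, _⟩ := hnd 0 (by simp) (by simpa using heq)
      omega
    refine ⟨⟨hin1, hin2, hne⟩, ?_⟩
    by_cases hdot : PySem.List.pyGet? l i = some '.'
    · exact Or.inl hdot
    · refine Or.inr (ih ?_ ?_)
      · intro k hk hcond
        have := hpre (k + 1) (by simpa using hk) (by
          intro j hj
          match j with
          | 0 => simpa using hdot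
          | j + 1 => simpa using hcond j (by omega))
        simpa using this
      · intro k hk heq
        obtain ⟨j, hj, hdotj⟩ := hnd (k + 1) (by simpa using hk) (by simpa using heq)
        match j with
        | 0 => exact absurd (by simpa using hdotj) hdot
        | j + 1 => exact ⟨j, by omega, by simpa using hdotj⟩


-- ----- tightness: inside D_ the two results differ (A's splice strictly lengthens) -----

theorem pvSplice_len_ge (s : List Char) (i : Int) (c : Char) :
    s.length ≤ (pvSpliceA s i c).length := by
  unfold pvSpliceA
  by_cases h : 0 ≤ i
  · rw [PySem.List.slice_to s h, PySem.List.slice_from s (by omega : (0:Int) ≤ i + 1)]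
    have : (i + 1).toNat = i.toNat + 1 := by omega
    simp [this]
    omega
  · by_cases h1 : i = -1
    · subst h1
      rw [PySem.List.slice_to_neg_one, (by norm_num : (-1 : Int) + 1 = 0),
        PySem.List.slice_from s (by omega : (0:Int) ≤ 0)]
      simp
      omega
    · have hk : ∃ k : Nat, i = -(k : Int) ∧ 2 ≤ k := ⟨(-i).toNat, by omega, by omega⟩
      obtain ⟨k, rfl, hk2⟩ := hk
      have h2 : -(k : Int) + 1 = -((k - 1 : Nat) : Int) := by omega
      rw [PySem.List.slice_to_neg_natCast s k (by omega), h2,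
        PySem.List.slice_from_neg_natCast s (k - 1) (by omega)]
      simp
      omega

theorem pvSplice_neg1_len (s : List Char) (c : Char) :
    s.length < (pvSpliceA s (-1) c).length := by
  unfold pvSpliceA
  rw [PySem.List.slice_to_neg_one, (by norm_num : (-1 : Int) + 1 = 0),
    PySem.List.slice_from s (by omega : (0:Int) ≤ 0)]
  rcases s with _ | ⟨a, t⟩
  · simp
  · simp

theorem pvResetF_mono (hs : List Int) (s : List Char) :
    s.length ≤ (hs.foldl (fun t j => pvSpliceA t j '.') s).length := by
  induction hs generalizing s with
  | nil => simp
  | cons j rest ih =>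
    simp only [List.foldl_cons]
    exact le_trans (pvSplice_len_ge s j '.') (ih _)

theorem pvResetF_neg1 (hs : List Int) (s : List Char) (h : -1 ∈ hs) :
    s.length < (hs.foldl (fun t j => pvSpliceA t j '.') s).length := by
  induction hs generalizing s with
  | nil => simp at h
  | cons j rest ih =>
    simp only [List.foldl_cons]
    rcases List.mem_cons.mp h with hj | hj
    · subst hj
      exact lt_of_lt_of_le (pvSplice_neg1_len s '.') (pvResetF_mono rest _)
    · exact lt_of_le_of_lt (pvSplice_len_ge s j '.') (ih _ hj)

-- -1 occurs in the index list at or before the first index holding '.'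
def pvHasNeg1 (l : List Char) : List Int → Prop
  | [] => False
  | i :: rs => i = -1 ∨ (PySem.List.pyGet? l i ≠ some '.' ∧ pvHasNeg1 l rs)

theorem pvBridgeD (l : List Char) (idx : List Int)
    (h : ∃ k, k < idx.length ∧ idx.getD k 0 = -1 ∧
      ∀ j, j < k → PySem.List.pyGet? l (idx.getD j 0) ≠ some '.') :
    pvHasNeg1 l idx := by
  induction idx with
  | nil => obtain ⟨k, hk, -⟩ := h; simp at hk
  | cons i rs ih =>
    obtain ⟨k, hk, hk1, hk2⟩ := h
    match k with
    | 0 => exact Or.inl (by simpa using hk1)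
    | k + 1 =>
      refine Or.inr ⟨by simpa using hk2 0 (by omega), ih ⟨k, by simpa using hk, by simpa using hk1, ?_⟩⟩
      intro j hj
      simpa using hk2 (j + 1) (by omega)

theorem pvLenA (l : List Char) (rest : List Int) (hs : List Int)
    (h : pvHasNeg1 l rest ∨ -1 ∈ hs) :
    l.length < ((pvLoopA l hs rest).2.foldl (fun s i => pvSpliceA s i '.') (pvLoopA l hs rest).1).length := by
  induction rest generalizing hs with
  | nil =>
    rcases h with h | h
    · exact absurd h (by simp [pvHasNeg1])
    · simpa [pvLoopA] using pvResetF_neg1 hs l h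
  | cons i rs ih =>
    by_cases hdot : PySem.List.pyGet? l i = some '.'
    · simp only [pvLoopA, hdot, if_pos]
      have hi : i = -1 ∨ -1 ∈ hs := by
        rcases h with h | h
        · rcases h with h | ⟨hne, -⟩
          · exact Or.inl h
          · exact absurd hdot hne
        · exact Or.inr h
      rcases hi with hi | hi
      · subst hi
        exact lt_of_lt_of_le (pvSplice_neg1_len l '#') (pvResetF_mono hs _)
      · exact lt_of_le_of_lt (pvSplice_len_ge l i '#') (pvResetF_neg1 hs _ hi)
    · simp only [pvLoopA, hdot, if_false]
      refine ih (hs ++ [i]) ?_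
      rcases h with h | h
      · rcases h with h | ⟨-, h⟩
        · exact Or.inr (by simp [h])
        · exact Or.inl h
      · exact Or.inr (by simp [h])

-- ===== VERDICT (by name: the statement is the Claim_ definition above) =====
theorem increase_string_spec : Claim_unchanged_increase_string := by
  intro old idx _hdom hpre hnd
  unfold increase_string increase_string_alt
  have hpre' : ∀ k, k < idx.length →
      (∀ j, j < k → PySem.List.pyGet? old.toList (idx.getD j 0) ≠ some '.') →
      PySem.Raise.InRange old.toList.length (idx.getD k 0) := by
    intro k hk hc
    exact hpre k hk (by simpa [PySem.Str.pyGet?, PySem.Chars.pyGet?_eq_listPyGet?] using hc)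
  have hnd' : ∀ k, k < idx.length → idx.getD k 0 = -1 →
      ∃ j, j < k ∧ PySem.List.pyGet? old.toList (idx.getD j 0) = some '.' := by
    intro k hk heq
    unfold D_increase_string at hnd
    push Not at hnd
    obtain ⟨j, hj, hdotj⟩ := hnd k hk heq
    exact ⟨j, hj, by simpa [PySem.Str.pyGet?, PySem.Chars.pyGet?_eq_listPyGet?] using hdotj⟩
  have hgp := pvBridge old.toList idx hpre' hnd'
  have hc := pvCore old.toList idx [] (by simp) hgp
  simp only [List.foldl_nil] at hc
  have halt := pvAltCore old.toList idx old.toList rfl hgp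
  simp only []
  rw [hc, ← halt]
  congr 1
  apply List.map_congr_left
  intro pc _
  by_cases hfl : some pc.1 = (if pvFindDot old.toList idx < idx.length then
      some (pvNorm old.toList.length (idx.getD (pvFindDot old.toList idx) 0)) else none)
  · simp [hfl]
  · -- membership in the reset Set is membership in the normalized list (Set.contains_iff/mem_ofList)
    simp only [hfl, if_false, PySem.Set.contains_eq_listContains, PySem.Set.mem_ofList,
      List.contains_iff_mem]

theorem increase_string_changed : Claim_changed_increase_string := by
  unfold Claim_changed_increase_string; decide

theorem increase_string_tight : Claim_exact_increase_string := by
  intro old idx _hdom _hpre hd heq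
  have hd' : ∃ k, k < idx.length ∧ idx.getD k 0 = -1 ∧
      ∀ j, j < k → PySem.List.pyGet? old.toList (idx.getD j 0) ≠ some '.' := by
    obtain ⟨k, hk, hk1, hk2⟩ := hd
    exact ⟨k, hk, hk1, fun j hj =>
      by simpa [PySem.Str.pyGet?, PySem.Chars.pyGet?_eq_listPyGet?] using hk2 j hj⟩
  have hA := pvLenA old.toList idx [] (Or.inl (pvBridgeD old.toList idx hd'))
  have hB : (increase_string_alt old idx).toList.length = old.toList.length := by
    simp [increase_string_alt, PySem.List.length_enumerate]
  have hlist := congrArg String.toList heq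
  simp only [increase_string, String.toList_ofList] at hlist
  rw [hlist] at hA
  omega
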